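-- pv_equiv track=rewrite | github.com/airyhtak/alignmentos | data_loader.py | get_effective_org
-- ===== SOURCE A (Python) =====
-- def get_direct_reports(company_data, employee):
--     """Get direct reports for a given employee."""
--     name = employee.get("name")
--     return [e for e in company_data.get("employees", []) if e.get("reports_to") == name]
--
-- def get_org_tree(company_data, employee):
--     """Get all employees in the reporting chain below this person, recursively."""
--     result = []
--     directs = get_direct_reports(company_data, employee)
--     for d in directs:
--         result.append(d)
--         result.extend(get_org_tree(company_data, d))
--     return result
--
-- def get_effective_org(company_data, employee):
--     """Get the org a leader should see: direct tree if available, else all employees for top-level roles."""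
--     org = get_org_tree(company_data, employee)
--     if org:
--         return org
--     # Top-level exec with no reporting chain — show all other employees
--     role_level = employee.get("role_level", "ic")
--     if role_level in ("c-suite", "vp", "director"):
--         return [e for e in company_data.get("employees", []) if e.get("name") != employee.get("name")]
--     return org
-- ===== SOURCE B (Python) =====
-- def get_effective_org(company_data, employee):
--     """Get the org a leader should see: direct tree if available, else all employees for top-level roles."""
--     employees = company_data.get("employees", [])
--     # index the reporting graph once: reports_to -> list of direct reports (in list order)
--     children = {}
--     for e in employees:
--         children.setdefault(e.get("reports_to"), []).append(e)
--     # iterative preorder DFS with an explicit stack (no recursion)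
--     result = []
--     stack = list(reversed(children.get(employee.get("name"), [])))
--     while stack:
--         e = stack.pop()
--         result.append(e)
--         stack.extend(reversed(children.get(e.get("name"), [])))
--     if result:
--         return result
--     if employee.get("role_level", "ic") in ("c-suite", "vp", "director"):
--         name = employee.get("name")
--         return [e for e in employees if e.get("name") != name]
--     return result
-- ===== Notes on version B (the rewrite author's own statement) =====
-- stated objective: alternative
-- what changed: A rescans the whole employee list for direct reports at every node of a recursive tree walk; B builds a reports_to->children index in one pass and then runs a single iterative preorder DFS with an explicit stack.
import Mathlib
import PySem

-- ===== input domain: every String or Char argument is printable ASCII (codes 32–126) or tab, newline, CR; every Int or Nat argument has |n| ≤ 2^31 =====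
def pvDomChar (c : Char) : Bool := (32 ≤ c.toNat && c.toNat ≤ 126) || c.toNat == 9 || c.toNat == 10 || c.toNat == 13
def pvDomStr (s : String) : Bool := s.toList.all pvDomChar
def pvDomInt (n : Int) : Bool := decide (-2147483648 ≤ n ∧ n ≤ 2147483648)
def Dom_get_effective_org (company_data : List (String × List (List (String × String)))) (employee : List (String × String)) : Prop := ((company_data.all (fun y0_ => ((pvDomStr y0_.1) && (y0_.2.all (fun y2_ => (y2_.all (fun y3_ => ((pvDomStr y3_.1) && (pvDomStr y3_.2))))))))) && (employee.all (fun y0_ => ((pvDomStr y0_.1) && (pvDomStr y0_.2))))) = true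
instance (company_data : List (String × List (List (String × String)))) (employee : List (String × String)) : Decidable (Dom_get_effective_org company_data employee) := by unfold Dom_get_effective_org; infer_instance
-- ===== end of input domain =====

-- B replaces A's per-node rescan of the employee list (inside a recursive walk) by a
-- reports_to→children index built once plus a single iterative stack-based preorder DFS.

-- ===== PORT A =====
-- helper get_direct_reports: [e for e in company_data.get("employees", []) if e.get("reports_to") == name]
def pvGetDirectReports (company_data : List (String × List (List (String × String)))) (employee : List (String × String)) : List (List (String × String)) :=
  let name := employee.lookup "name"
  ((company_data.lookup "employees").getD []).filter (fun e => e.lookup "reports_to" == name)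

-- helper get_org_tree; Python's unbounded recursion carries a fuel counter (len(employees)+1
-- suffices on every input where the Python terminates, see the lemmas below)
def pvOrgTree (company_data : List (String × List (List (String × String)))) : Nat → List (String × String) → List (List (String × String))
  | 0, _ => []
  | fuel + 1, employee =>
    (pvGetDirectReports company_data employee).foldl
      (fun result d => result ++ [d] ++ pvOrgTree company_data fuel d) []

def get_effective_org (company_data : List (String × List (List (String × String)))) (employee : List (String × String)) : List (List (String × String)) :=
  let employees := (company_data.lookup "employees").getD []
  let org := pvOrgTree company_data (employees.length + 1) employee
  if org.isEmpty then
    let role_level := (employee.lookup "role_level").getD "ic"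
    if role_level == "c-suite" || role_level == "vp" || role_level == "director" then
      employees.filter (fun e => e.lookup "name" != employee.lookup "name")
    else org
  else org

-- ===== PORT B =====
-- children.setdefault(e.get("reports_to"), []).append(e) for each employee
def pvBuildChildren (employees : List (List (String × String))) : PySem.Dict (Option String) (List (List (String × String))) :=
  employees.foldl (fun d e => d.modify (e.lookup "reports_to") [] (· ++ [e])) PySem.Dict.empty

-- children.get(k, [])
def pvChGet (ch : PySem.Dict (Option String) (List (List (String × String)))) (k : Option String) : List (List (String × String)) :=
  ch.getD k []

-- while stack: e = stack.pop(); result.append(e); stack.extend(reversed(children.get(e.get("name"), [])))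
-- (fuel counter for Lean totality; (n+1)^(n+1) bounds the produced output on every terminating input)
def pvLoop (ch : PySem.Dict (Option String) (List (List (String × String)))) : Nat → List (List (String × String)) → List (List (String × String)) → List (List (String × String))
  | 0, _, result => result
  | fuel + 1, stack, result =>
    match stack.getLast? with
    | none => result
    | some e => pvLoop ch fuel (stack.dropLast ++ (pvChGet ch (e.lookup "name")).reverse) (result ++ [e])

def get_effective_org_alt (company_data : List (String × List (List (String × String)))) (employee : List (String × String)) : List (List (String × String)) :=
  let employees := (company_data.lookup "employees").getD []
  let ch := pvBuildChildren employees
  let n := employees.length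
  let result := pvLoop ch ((n + 1) ^ (n + 1)) ((pvChGet ch (employee.lookup "name")).reverse) []
  if result.isEmpty then
    if (employee.lookup "role_level").getD "ic" == "c-suite" ||
       (employee.lookup "role_level").getD "ic" == "vp" ||
       (employee.lookup "role_level").getD "ic" == "director" then
      employees.filter (fun e => e.lookup "name" != employee.lookup "name")
    else result
  else result

-- ===== PRECONDITION & SPEC =====
-- keys reachable in one step: the names of the direct reports of key k
def pvNext (employees : List (List (String × String))) (k : Option String) : List (Option String) :=
  (employees.filter (fun e => e.lookup "reports_to" == k)).map (fun e => e.lookup "name")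

-- grow a key set by its one-step successors (one saturation round of the closure)
def pvGrow (employees : List (List (String × String))) (S : List (Option String)) : List (Option String) :=
  S ++ (PySem.List.dedup (S.flatMap (pvNext employees))).filter (fun x => decide (x ∉ S))

-- the keys reachable from k in at least one step: the transitive closure of the reports_to
-- relation (length+2 saturation rounds are a fixpoint — there are only length+1 keys)
def pvReach (employees : List (List (String × String))) (k : Option String) : List (Option String) :=
  (pvGrow employees)^[employees.length + 2] (PySem.List.dedup (pvNext employees k))

-- the keys reachable from the root key (including it)
def pvRootClosure (employees : List (List (String × String))) (rootk : Option String) : List (Option String) :=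
  (pvGrow employees)^[employees.length + 2] [rootk]

-- Pre_: the reports_to graph has no cycle reachable from the employee's name — exactly the
-- inputs on which A's recursion terminates (on a reachable cycle Python raises RecursionError).
def Pre_get_effective_org (company_data : List (String × List (List (String × String)))) (employee : List (String × String)) : Prop :=
  ∀ j ∈ pvRootClosure ((company_data.lookup "employees").getD []) (employee.lookup "name"),
    j ∉ pvReach ((company_data.lookup "employees").getD []) j

instance (company_data : List (String × List (List (String × String)))) (employee : List (String × String)) : Decidable (Pre_get_effective_org company_data employee) := by unfold Pre_get_effective_org; infer_instance

def pvWitness_get_effective_org : (List (String × List (List (String × String)))) × (List (String × String)) :=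
  ([("employees", [[("name", "b"), ("reports_to", "a")]])], [("name", "a"), ("role_level", "c-suite")])

def Spec_get_effective_org (company_data : List (String × List (List (String × String)))) (employee : List (String × String)) (out : List (List (String × String))) : Prop := out = get_effective_org_alt company_data employee
instance (company_data : List (String × List (List (String × String)))) (employee : List (String × String)) (out : List (List (String × String))) : Decidable (Spec_get_effective_org company_data employee out) := by unfold Spec_get_effective_org; infer_instance

-- ===== CLAIM (what is proved, stated in full; the proofs are below) =====
def Claim_equal_get_effective_org : Prop := ∀ (company_data : List (String × List (List (String × String)))) (employee : List (String × String)), Dom_get_effective_org company_data employee → Pre_get_effective_org company_data employee → Spec_get_effective_org company_data employee (get_effective_org company_data employee)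

-- ===== LEMMAS AND PROOFS =====

-- direct reports of a key (A's filter, keyed by the parent's name only)
def chK (employees : List (List (String × String))) (k : Option String) : List (List (String × String)) :=
  employees.filter (fun e => e.lookup "reports_to" == k)

-- A's org tree, keyed by the parent's name
def FK (employees : List (List (String × String))) : Nat → Option String → List (List (String × String))
  | 0, _ => []
  | f + 1, k => (chK employees k).flatMap (fun d => d :: FK employees f (d.lookup "name"))

lemma foldl_add_len (l : List (Option String)) : ∀ s : List (Option String),
    (l.foldl PySem.Set.add s).length ≤ s.length + l.length := by
  induction l with
  | nil => intro s; simp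
  | cons x l ih =>
    intro s
    have h1 : (PySem.Set.add s x).length ≤ s.length + 1 := by
      unfold PySem.Set.add; split <;> simp
    have := ih (PySem.Set.add s x)
    simp only [List.foldl_cons, List.length_cons]
    omega

lemma dedup_len_le (l : List (Option String)) : (PySem.List.dedup l).length ≤ l.length := by
  have h : PySem.List.dedup l = l.foldl PySem.Set.add [] := by
    simp [PySem.List.dedup_eq_ofList, PySem.Set.ofList_eq_foldl]
  rw [h]
  simpa using foldl_add_len l []

-- names of all employees (every key reachable in one step is one of these)
def pvNames (E : List (List (String × String))) : List (Option String) :=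
  E.map (fun e => e.lookup "name")

lemma next_subset_names (E : List (List (String × String))) (j : Option String) :
    pvNext E j ⊆ pvNames E := by
  intro x hx
  simp only [pvNext, List.mem_map] at hx
  obtain ⟨e, he, rfl⟩ := hx
  exact List.mem_map.mpr ⟨e, (List.mem_filter.mp he).1, rfl⟩

lemma subset_step (E : List (List (String × String))) (S : List (Option String)) :
    S ⊆ pvGrow E S :=
  List.subset_append_left _ _

lemma step_eq_or_lt (E : List (List (String × String))) (S : List (Option String)) :
    pvGrow E S = S ∨ S.length < (pvGrow E S).length := by
  by_cases h : (PySem.List.dedup (S.flatMap (pvNext E))).filter (fun x => decide (x ∉ S)) = []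
  · left; rw [pvGrow, h, List.append_nil]
  · right
    have hpos : 0 < ((PySem.List.dedup (S.flatMap (pvNext E))).filter (fun x => decide (x ∉ S))).length :=
      List.length_pos_of_ne_nil h
    simp only [pvGrow, List.length_append]
    omega

lemma step_nodup (E : List (List (String × String))) (S : List (Option String))
    (h : S.Nodup) : (pvGrow E S).Nodup := by
  rw [pvGrow]
  refine List.Nodup.append h ((PySem.List.nodup_dedup _).filter _) ?_
  intro a haS hafil
  have h2 := (List.mem_filter.mp hafil).2
  simp only [decide_eq_true_eq] at h2
  exact absurd haS h2

lemma step_subset (E : List (List (String × String))) (S U : List (Option String))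
    (hS : S ⊆ U) (hU : pvNames E ⊆ U) : pvGrow E S ⊆ U := by
  intro x hx
  rcases List.mem_append.mp hx with hx | hx
  · exact hS hx
  · have hx' := (List.mem_filter.mp hx).1
    rw [PySem.List.mem_dedup] at hx'
    obtain ⟨j, _, hj⟩ := List.mem_flatMap.mp hx'
    exact hU (next_subset_names E j hj)

lemma subset_iter (E : List (List (String × String))) :
    ∀ (b : Nat) (S : List (Option String)), S ⊆ (pvGrow E)^[b] S := by
  intro b
  induction b with
  | zero => intro S; exact fun _ h => h
  | succ b ih =>
    intro S
    exact fun x hx => ih (pvGrow E S) (subset_step E S hx)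

lemma iter_nodup_subset (E : List (List (String × String))) (U : List (Option String))
    (hU : pvNames E ⊆ U) :
    ∀ (b : Nat) (S : List (Option String)), S.Nodup → S ⊆ U →
      ((pvGrow E)^[b] S).Nodup ∧ (pvGrow E)^[b] S ⊆ U := by
  intro b
  induction b with
  | zero => intro S hn hs; exact ⟨hn, hs⟩
  | succ b ih =>
    intro S hn hs
    exact ih (pvGrow E S) (step_nodup E S hn) (step_subset E S U hs hU)

lemma step_fix_iter (E : List (List (String × String))) :
    ∀ (b : Nat) (S : List (Option String)), pvGrow E S = S → (pvGrow E)^[b] S = S := by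
  intro b
  induction b with
  | zero => intro S _; rfl
  | succ b ih =>
    intro S h
    show (pvGrow E)^[b] (pvGrow E S) = S
    rw [h]; exact ih S h

lemma iter_fix_or_big (E : List (List (String × String))) (U : List (Option String))
    (hU : pvNames E ⊆ U) :
    ∀ (b : Nat) (S : List (Option String)), S.Nodup → S ⊆ U →
      pvGrow E ((pvGrow E)^[b] S) = (pvGrow E)^[b] S ∨ S.length + b ≤ ((pvGrow E)^[b] S).length := by
  intro b
  induction b with
  | zero => intro S _ _; right; simp
  | succ b ih =>
    intro S hn hs
    rcases step_eq_or_lt E S with hfix | hlt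
    · left
      rw [step_fix_iter E (b + 1) S hfix]; exact hfix
    · rcases ih (pvGrow E S) (step_nodup E S hn) (step_subset E S U hs hU) with h | h
      · left; exact h
      · right
        show S.length + (b + 1) ≤ ((pvGrow E)^[b] (pvGrow E S)).length
        omega

lemma nodup_subset_le (S U : List (Option String)) (hn : S.Nodup) (hsub : S ⊆ U) :
    S.length ≤ (PySem.List.dedup U).length := by
  have h1 : S.toFinset ⊆ U.toFinset := by
    intro a ha; simp only [List.mem_toFinset] at *; exact hsub ha
  have h2 := Finset.card_le_card h1
  rw [List.toFinset_card_of_nodup hn] at h2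
  refine h2.trans ?_
  have h3 : (PySem.List.dedup U).toFinset = U.toFinset := by
    ext a; simp
  rw [← h3, List.toFinset_card_of_nodup (PySem.List.nodup_dedup U)]

lemma iter_fixed (E : List (List (String × String))) (U : List (Option String))
    (hU : pvNames E ⊆ U) (b : Nat) (S : List (Option String))
    (hn : S.Nodup) (hs : S ⊆ U) (hb : (PySem.List.dedup U).length < b) :
    pvGrow E ((pvGrow E)^[b] S) = (pvGrow E)^[b] S := by
  rcases iter_fix_or_big E U hU b S hn hs with h | h
  · exact h
  · exfalso
    obtain ⟨nod, sub⟩ := iter_nodup_subset E U hU b S hn hs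
    have := nodup_subset_le ((pvGrow E)^[b] S) U nod sub
    omega

lemma fix_closed (E : List (List (String × String))) (S : List (Option String))
    (h : pvGrow E S = S) :
    ∀ j ∈ S, ∀ x ∈ pvNext E j, x ∈ S := by
  have hlen := congrArg List.length h
  simp only [pvGrow, List.length_append] at hlen
  have hnil : (PySem.List.dedup (S.flatMap (pvNext E))).filter (fun x => decide (x ∉ S)) = [] :=
    List.length_eq_zero_iff.mp (by omega)
  intro j hj x hx
  by_contra hxn
  have hmem : x ∈ (PySem.List.dedup (S.flatMap (pvNext E))).filter (fun x => decide (x ∉ S)) := by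
    refine List.mem_filter.mpr ⟨?_, by simpa using hxn⟩
    rw [PySem.List.mem_dedup]
    exact List.mem_flatMap.mpr ⟨j, hj, hx⟩
  rw [hnil] at hmem
  exact absurd hmem (List.not_mem_nil)

lemma iter_subset_closed (E : List (List (String × String))) (T : List (Option String))
    (hT : ∀ j ∈ T, ∀ x ∈ pvNext E j, x ∈ T) :
    ∀ (b : Nat) (S : List (Option String)), S ⊆ T → (pvGrow E)^[b] S ⊆ T := by
  intro b
  induction b with
  | zero => intro S hs; exact hs
  | succ b ih =>
    intro S hs
    refine ih (pvGrow E S) ?_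
    intro x hx
    rcases List.mem_append.mp hx with hx | hx
    · exact hs hx
    · have hx' := (List.mem_filter.mp hx).1
      rw [PySem.List.mem_dedup] at hx'
      obtain ⟨j, hj, hxj⟩ := List.mem_flatMap.mp hx'
      exact hT j (hs hj) x hxj

lemma names_length (E : List (List (String × String))) : (pvNames E).length = E.length :=
  List.length_map ..

lemma reach_fix (E : List (List (String × String))) (k : Option String) :
    pvGrow E (pvReach E k) = pvReach E k := by
  apply iter_fixed E (pvNames E) (fun _ h => h) _ _ (PySem.List.nodup_dedup _)
  · intro x hx
    rw [PySem.List.mem_dedup] at hx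
    exact next_subset_names E k hx
  · have h1 : (PySem.List.dedup (pvNames E)).length ≤ (pvNames E).length :=
      dedup_len_le _
    rw [names_length] at h1
    omega

lemma reach_nodup_subset (E : List (List (String × String))) (k : Option String) :
    (pvReach E k).Nodup ∧ pvReach E k ⊆ pvNames E := by
  apply iter_nodup_subset E (pvNames E) (fun _ h => h) _ _ (PySem.List.nodup_dedup _)
  intro x hx
  rw [PySem.List.mem_dedup] at hx
  exact next_subset_names E k hx

lemma next_subset_reach (E : List (List (String × String))) (k : Option String) :
    pvNext E k ⊆ pvReach E k := by
  intro x hx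
  exact subset_iter E _ _ (by rwa [PySem.List.mem_dedup])

lemma reach_closed (E : List (List (String × String))) (k : Option String) :
    ∀ j ∈ pvReach E k, ∀ x ∈ pvNext E j, x ∈ pvReach E k :=
  fix_closed E _ (reach_fix E k)

lemma reach_mono (E : List (List (String × String))) (k x : Option String)
    (hx : x ∈ pvNext E k) : pvReach E x ⊆ pvReach E k := by
  apply iter_subset_closed E _ (reach_closed E k)
  intro a ha
  rw [PySem.List.mem_dedup] at ha
  exact reach_closed E k x (next_subset_reach E k hx) a ha

lemma rootClosure_closed (E : List (List (String × String))) (rootk : Option String) :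
    ∀ j ∈ pvRootClosure E rootk, ∀ x ∈ pvNext E j, x ∈ pvRootClosure E rootk := by
  apply fix_closed
  apply iter_fixed E (rootk :: pvNames E) (fun x h => List.mem_cons_of_mem _ h) _ _
    (List.nodup_singleton rootk)
  · intro x hx
    rw [List.mem_singleton] at hx
    exact hx ▸ List.mem_cons_self ..
  · have h1 : (PySem.List.dedup (rootk :: pvNames E)).length ≤ (rootk :: pvNames E).length :=
      dedup_len_le _
    simp only [List.length_cons, names_length] at h1
    omega

lemma root_mem_closure (E : List (List (String × String))) (rootk : Option String) :
    rootk ∈ pvRootClosure E rootk :=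
  subset_iter E _ _ (List.mem_singleton.mpr rfl)

-- the measure: number of keys strictly reachable from k
def pvM (E : List (List (String × String))) (k : Option String) : Nat :=
  (pvReach E k).length

lemma measure_lt (E : List (List (String × String))) (rootk : Option String)
    (hPre : ∀ j ∈ pvRootClosure E rootk, j ∉ pvReach E j)
    (k x : Option String) (hk : k ∈ pvRootClosure E rootk) (hx : x ∈ pvNext E k) :
    pvM E x < pvM E k := by
  have hxCl : x ∈ pvRootClosure E rootk := rootClosure_closed E rootk k hk x hx
  have hxR : x ∈ pvReach E k := next_subset_reach E k hx
  have hxnR : x ∉ pvReach E x := hPre x hxCl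
  have hsub : pvReach E x ⊆ pvReach E k := reach_mono E k x hx
  have hnx := (reach_nodup_subset E x).1
  have hnk := (reach_nodup_subset E k).1
  have h1 : (pvReach E x).toFinset ⊂ (pvReach E k).toFinset := by
    constructor
    · intro a ha; simp only [List.mem_toFinset] at *; exact hsub ha
    · intro hc
      exact hxnR (by simpa using hc (by simpa using hxR))
  have := Finset.card_lt_card h1
  rwa [List.toFinset_card_of_nodup hnx, List.toFinset_card_of_nodup hnk] at this

lemma measure_le (E : List (List (String × String))) (k : Option String) :
    pvM E k ≤ E.length := by
  obtain ⟨hn, hs⟩ := reach_nodup_subset E k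
  have := nodup_subset_le _ _ hn hs
  have h2 : (PySem.List.dedup (pvNames E)).length ≤ (pvNames E).length := dedup_len_le _
  rw [names_length] at h2
  unfold pvM
  omega

lemma directs_eq (company_data : List (String × List (List (String × String))))
    (employee : List (String × String)) :
    pvGetDirectReports company_data employee
      = chK ((company_data.lookup "employees").getD []) (employee.lookup "name") := rfl

lemma FK_succ (E : List (List (String × String))) (f : Nat) (k : Option String) :
    FK E (f + 1) k = (chK E k).flatMap (fun d => d :: FK E f (d.lookup "name")) := rfl

lemma name_mem_next (E : List (List (String × String))) (k : Option String)
    (d : List (String × String)) (hd : d ∈ chK E k) : d.lookup "name" ∈ pvNext E k :=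
  List.mem_map.mpr ⟨d, hd, rfl⟩

lemma orgTree_eq_FK (company_data : List (String × List (List (String × String)))) :
    ∀ (f : Nat) (employee : List (String × String)),
      pvOrgTree company_data f employee
        = FK ((company_data.lookup "employees").getD []) f (employee.lookup "name") := by
  intro f
  induction f with
  | zero => intro e; rfl
  | succ f ih =>
    intro e
    show (pvGetDirectReports company_data e).foldl
        (fun result d => result ++ [d] ++ pvOrgTree company_data f d) [] = _
    simp only [List.append_assoc, List.singleton_append]
    rw [PySem.List.foldl_append_eq_flatMap (fun d => d :: pvOrgTree company_data f d)]
    rw [directs_eq, FK_succ, List.nil_append]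
    exact List.flatMap_congr (fun d _ => by rw [ih d])

lemma FStab (E : List (List (String × String))) (rootk : Option String)
    (hPre : ∀ j ∈ pvRootClosure E rootk, j ∉ pvReach E j) :
    ∀ (N : Nat) (k : Option String), k ∈ pvRootClosure E rootk → pvM E k < N →
      ∀ f1 f2 : Nat, pvM E k < f1 → pvM E k < f2 → FK E f1 k = FK E f2 k := by
  intro N
  induction N with
  | zero => intro k _ h; omega
  | succ N ih =>
    intro k hk hN f1 f2 h1 h2
    obtain ⟨g1, rfl⟩ : ∃ g, f1 = g + 1 := ⟨f1 - 1, by omega⟩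
    obtain ⟨g2, rfl⟩ : ∃ g, f2 = g + 1 := ⟨f2 - 1, by omega⟩
    rw [FK_succ, FK_succ]
    refine List.flatMap_congr (fun d hd => ?_)
    have hnext := name_mem_next E k d hd
    have hm := measure_lt E rootk hPre k (d.lookup "name") hk hnext
    have hcl : d.lookup "name" ∈ pvRootClosure E rootk := rootClosure_closed E rootk k hk _ hnext
    have hrec : FK E g1 (d.lookup "name") = FK E g2 (d.lookup "name") := by
      rcases Nat.eq_or_lt_of_le (Nat.zero_le g1) with _ | _
      all_goals exact ih (d.lookup "name") hcl (by omega) g1 g2 (by omega) (by omega)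
    rw [hrec]

-- unfolding A's tree once at its stable fuel E.length + 1
lemma FK_unfold (E : List (List (String × String))) (rootk : Option String)
    (hPre : ∀ j ∈ pvRootClosure E rootk, j ∉ pvReach E j)
    (k : Option String) (hk : k ∈ pvRootClosure E rootk) :
    FK E (E.length + 1) k
      = (chK E k).flatMap (fun d => d :: FK E (E.length + 1) (d.lookup "name")) := by
  have hm := measure_le E k
  rw [FStab E rootk hPre (E.length + 1) k hk (by omega) (E.length + 1) (E.length + 2)
    (by omega) (by omega)]
  exact FK_succ E (E.length + 1) k

lemma FK_size (E : List (List (String × String))) :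
    ∀ (f : Nat) (k : Option String), (FK E f k).length + 1 ≤ (E.length + 1) ^ f := by
  intro f
  induction f with
  | zero => intro k; simp [FK]
  | succ f ih =>
    intro k
    have hpow : 1 ≤ (E.length + 1) ^ f := Nat.one_le_pow _ _ (by omega)
    have hch : (chK E k).length ≤ E.length := List.length_filter_le _ _
    rw [FK_succ, List.length_flatMap]
    have hsum : ((chK E k).map (fun d => (d :: FK E f (d.lookup "name")).length)).sum
        ≤ (chK E k).length * (E.length + 1) ^ f := by
      have hb : ∀ x ∈ (chK E k).map (fun d => (d :: FK E f (d.lookup "name")).length),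
          x ≤ (E.length + 1) ^ f := by
        intro x hx
        obtain ⟨d, _, rfl⟩ := List.mem_map.mp hx
        have := ih (d.lookup "name")
        simp only [List.length_cons]
        omega
      simpa using List.sum_le_card_nsmul _ _ hb
    have hpows : (E.length + 1) ^ (f + 1) = (E.length + 1) ^ f * (E.length + 1) := pow_succ _ _
    have hmul : (chK E k).length * (E.length + 1) ^ f ≤ E.length * (E.length + 1) ^ f :=
      Nat.mul_le_mul_right _ hch
    rw [hpows]
    nlinarith [hsum, hmul, hpow]

lemma chGet_eq (E : List (List (String × String))) (k : Option String) :
    pvChGet (pvBuildChildren E) k = chK E k := by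
  unfold pvChGet pvBuildChildren
  rw [show E.foldl (fun d e => d.modify (e.lookup "reports_to") [] (· ++ [e])) PySem.Dict.empty
      = (E.map (fun e => (e.lookup "reports_to", e))).foldl
          (fun d p => d.modify p.1 [] (· ++ [p.2])) PySem.Dict.empty from by rw [List.foldl_map]]
  rw [PySem.Dict.getD_foldl_modify_append]
  simp [List.filter_map, chK, Function.comp_def]

-- the B loop with the stack taken front-first (the port pops from the back)
def Lf (E : List (List (String × String))) :
    Nat → List (List (String × String)) → List (List (String × String)) → List (List (String × String))
  | 0, _, acc => acc
  | _ + 1, [], acc => acc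
  | f + 1, e :: s, acc => Lf E f (chK E (e.lookup "name") ++ s) (acc ++ [e])

lemma loop_rev (E : List (List (String × String))) :
    ∀ (f : Nat) (stack acc : List (List (String × String))),
      pvLoop (pvBuildChildren E) f stack acc = Lf E f stack.reverse acc := by
  intro f
  induction f with
  | zero => intro stack acc; rfl
  | succ f ih =>
    intro stack acc
    cases hst : stack.getLast? with
    | none =>
      rw [List.getLast?_eq_none_iff.mp hst]
      simp [pvLoop, Lf]
    | some e =>
      have hsp := List.dropLast_append_getLast? e hst
      have hrev : stack.reverse = e :: stack.dropLast.reverse := by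
        conv_lhs => rw [← hsp]
        simp
      rw [show pvLoop (pvBuildChildren E) (f + 1) stack acc
          = pvLoop (pvBuildChildren E) f
              (stack.dropLast ++ (pvChGet (pvBuildChildren E) (e.lookup "name")).reverse)
              (acc ++ [e]) from by simp [pvLoop, hst]]
      rw [ih, hrev]
      show _ = Lf E f (chK E (e.lookup "name") ++ stack.dropLast.reverse) (acc ++ [e])
      rw [List.reverse_append, List.reverse_reverse, chGet_eq]

lemma Lf_spec (E : List (List (String × String))) (rootk : Option String)
    (hPre : ∀ j ∈ pvRootClosure E rootk, j ∉ pvReach E j) :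
    ∀ (f : Nat) (s acc : List (List (String × String))),
      (∀ e ∈ s, e.lookup "name" ∈ pvRootClosure E rootk) →
      (s.flatMap (fun e => e :: FK E (E.length + 1) (e.lookup "name"))).length ≤ f →
      Lf E f s acc = acc ++ s.flatMap (fun e => e :: FK E (E.length + 1) (e.lookup "name")) := by
  intro f
  induction f with
  | zero =>
    intro s acc hs hf
    cases s with
    | nil => simp [Lf]
    | cons e s' => simp at hf
  | succ f ih =>
    intro s acc hs hf
    cases s with
    | nil => simp [Lf]
    | cons e s' =>
      show Lf E f (chK E (e.lookup "name") ++ s') (acc ++ [e]) = _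
      have hkCl : e.lookup "name" ∈ pvRootClosure E rootk := hs e (List.mem_cons_self ..)
      have hunf := FK_unfold E rootk hPre (e.lookup "name") hkCl
      have hlen : (FK E (E.length + 1) (e.lookup "name")).length
          = ((chK E (e.lookup "name")).flatMap
              (fun d => d :: FK E (E.length + 1) (d.lookup "name"))).length := by rw [hunf]
      rw [ih (chK E (e.lookup "name") ++ s') (acc ++ [e]) ?inv ?fuel]
      case inv =>
        intro e' he'
        rcases List.mem_append.mp he' with he' | he'
        · exact rootClosure_closed E rootk _ hkCl _ (name_mem_next E _ e' he')
        · exact hs e' (List.mem_cons_of_mem _ he')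
      case fuel =>
        rw [List.flatMap_append]
        simp only [List.flatMap_cons, List.length_append, List.length_cons] at hf ⊢
        omega
      rw [List.flatMap_append, ← hunf]
      simp [List.flatMap_cons]

-- A's org tree and B's DFS produce the same list
lemma org_eq_loop (company_data : List (String × List (List (String × String))))
    (employee : List (String × String))
    (hPre : Pre_get_effective_org company_data employee) :
    pvOrgTree company_data (((company_data.lookup "employees").getD []).length + 1) employee
      = pvLoop (pvBuildChildren ((company_data.lookup "employees").getD []))
          ((((company_data.lookup "employees").getD []).length + 1)
            ^ (((company_data.lookup "employees").getD []).length + 1))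
          ((pvChGet (pvBuildChildren ((company_data.lookup "employees").getD []))
            (employee.lookup "name")).reverse) [] := by
  set E := (company_data.lookup "employees").getD [] with hE
  set rootk := employee.lookup "name" with hroot
  have hPre' : ∀ j ∈ pvRootClosure E rootk, j ∉ pvReach E j := hPre
  have hrootCl := root_mem_closure E rootk
  have hunf := FK_unfold E rootk hPre' rootk hrootCl
  rw [loop_rev, List.reverse_reverse, chGet_eq]
  rw [Lf_spec E rootk hPre' _ _ _ ?inv ?fuel]
  case inv =>
    intro e he
    exact rootClosure_closed E rootk rootk hrootCl _ (name_mem_next E rootk e he)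
  case fuel =>
    have h1 := FK_size E (E.length + 1) rootk
    rw [← hunf]
    omega
  rw [orgTree_eq_FK, List.nil_append, ← hroot, ← hE, hunf]

-- ===== VERDICT (by name: the statement is the Claim_ definition above) =====
theorem get_effective_org_spec : Claim_equal_get_effective_org := by
  intro company_data employee _ hPre
  unfold Spec_get_effective_org get_effective_org get_effective_org_alt
  simp only []
  rw [org_eq_loop company_data employee hPre]
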